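-- pv_equiv track=rewrite | github.com/RobvEmous/Mod7Group2 | GI/DoeDingen.py | merge_sort_pairs_second
-- ===== SOURCE A (Python) =====
-- def merge_sort_pairs_second(list):
--     if len(list) > 1:
--         i = int((len(list) / 2))
--         f = merge_sort_pairs_second(list[:i])
--         s = merge_sort_pairs_second(list[i:])
--         r = []
--         fi = si = 0
--         while fi < len(f) and si < len(s):
--             if f[fi][1] < s[si][1] or f[fi][1] == s[si][1] and f[fi][0] < s[si][0]:
--                 r.append(f[fi])
--                 fi += 1
--             else:
--                 r.append(s[si])
--                 si += 1
--         if fi < len(f):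
--             r += f[fi:]
--         elif si < len(s):
--             r += s[si:]
--         return r
--     else:
--         return list
-- ===== SOURCE B (Python) =====
-- def merge_sort_pairs_second(list):
--     # Elements are (int, int) pairs, so the key (p[1], p[0]) determines the
--     # element completely: stability cannot be observed and the builtin sort
--     # returns exactly what A's merge sort returns.
--     return sorted(list, key=lambda p: (p[1], p[0]))
-- ===== Notes on version B (the rewrite author's own statement) =====
-- stated objective: idiomatic
-- what changed: Replaces the hand-written recursive merge sort (with its take-the-right-on-ties merge) by a single call to the builtin stable sort with tuple key (p[1], p[0]); since elements are int pairs, equal keys mean equal elements, so the results coincide exactly.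
import Mathlib
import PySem

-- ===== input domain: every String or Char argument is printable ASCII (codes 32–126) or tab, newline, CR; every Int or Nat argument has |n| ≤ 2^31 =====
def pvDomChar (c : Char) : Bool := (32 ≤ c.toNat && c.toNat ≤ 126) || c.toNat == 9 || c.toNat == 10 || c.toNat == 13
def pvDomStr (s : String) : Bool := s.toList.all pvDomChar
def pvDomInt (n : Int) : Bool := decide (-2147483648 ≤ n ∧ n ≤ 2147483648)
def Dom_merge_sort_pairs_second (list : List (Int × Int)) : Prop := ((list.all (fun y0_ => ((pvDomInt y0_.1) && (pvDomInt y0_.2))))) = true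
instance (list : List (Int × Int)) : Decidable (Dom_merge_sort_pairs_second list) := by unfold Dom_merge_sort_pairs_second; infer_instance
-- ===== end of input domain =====

-- B replaces A's hand-written recursive merge sort by one builtin stable sort with
-- tuple key (p[1], p[0]) (idiomatic); on int pairs equal keys mean equal elements,
-- so the two agree exactly.

-- ===== PORT A =====
-- The while loop over indices fi/si: head-to-head recursion over the two lists;
-- the two trailing 'r += f[fi:]' / 'r += s[si:]' branches are the base cases.
def pvMergeLoop : List (Int × Int) → List (Int × Int) → List (Int × Int)
  | [], s => s
  | f, [] => f
  | a :: f', b :: s' =>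
    if a.2 < b.2 ∨ (a.2 = b.2 ∧ a.1 < b.1) then
      a :: pvMergeLoop f' (b :: s')
    else
      b :: pvMergeLoop (a :: f') s'

-- list[:i] / list[i:] with 0 ≤ i ≤ len(list) are exactly take/drop
-- (PySem.List.slice_to / slice_from); int(len(list)/2) = len(list) / 2 exactly
-- (nonnegative, and list lengths are far below 2^53).
def merge_sort_pairs_second (list : List (Int × Int)) : List (Int × Int) :=
  if h : list.length > 1 then
    let i := list.length / 2
    pvMergeLoop (merge_sort_pairs_second (list.take i)) (merge_sort_pairs_second (list.drop i))
  else
    list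
termination_by list.length
decreasing_by
  · simp only [List.length_take]
    omega
  · simp only [List.length_drop]
    omega

-- ===== PORT B =====
-- sorted(list, key=lambda p: (p[1], p[0]))  →  PySem.List.sorted2 (tuple key)
def merge_sort_pairs_second_alt (list : List (Int × Int)) : List (Int × Int) :=
  PySem.List.sorted2 list (fun p => p.2) (fun p => p.1)

-- ===== PRECONDITION & SPEC =====
def Spec_merge_sort_pairs_second (list : List (Int × Int)) (out : List (Int × Int)) : Prop := out = merge_sort_pairs_second_alt list
instance (list : List (Int × Int)) (out : List (Int × Int)) : Decidable (Spec_merge_sort_pairs_second list out) := by unfold Spec_merge_sort_pairs_second; infer_instance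

-- ===== CLAIM (what is proved, stated in full; the proofs are below) =====
def Claim_equal_merge_sort_pairs_second : Prop := ∀ (list : List (Int × Int)), Dom_merge_sort_pairs_second list → Spec_merge_sort_pairs_second list (merge_sort_pairs_second list)

-- ===== LEMMAS AND PROOFS =====

-- the lexicographic key under which both programs sort
def pvKey (p : Int × Int) : Int ×ₗ Int := toLex (p.2, p.1)

theorem pvKey_injective : Function.Injective pvKey := by
  intro a b h
  have h' : (a.2, a.1) = (b.2, b.1) := congrArg ofLex h
  have h1 := congrArg Prod.fst h'
  have h2 := congrArg Prod.snd h'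
  exact Prod.ext h2 h1

theorem pvKey_lt_iff (a b : Int × Int) :
    pvKey a < pvKey b ↔ (a.2 < b.2 ∨ (a.2 = b.2 ∧ a.1 < b.1)) := by
  simp [pvKey, Prod.Lex.lt_iff]

theorem pvMergeLoop_perm (f s : List (Int × Int)) :
    (pvMergeLoop f s).Perm (f ++ s) := by
  induction f generalizing s with
  | nil => simp [pvMergeLoop]
  | cons a f' ihf =>
    induction s with
    | nil => simp [pvMergeLoop]
    | cons b s' ihs =>
      simp only [pvMergeLoop]
      split_ifs with hc
      · exact (ihf (b :: s')).cons a
      · refine ((ihs).cons b).trans ?_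
        exact (List.perm_middle (a := b) (l₁ := a :: f') (l₂ := s')).symm

theorem pvMergeLoop_pairwise {f s : List (Int × Int)}
    (hf : f.Pairwise (fun a b => pvKey a ≤ pvKey b))
    (hs : s.Pairwise (fun a b => pvKey a ≤ pvKey b)) :
    (pvMergeLoop f s).Pairwise (fun a b => pvKey a ≤ pvKey b) := by
  induction f generalizing s with
  | nil => simpa [pvMergeLoop] using hs
  | cons a f' ihf =>
    induction s with
    | nil => simpa [pvMergeLoop] using hf
    | cons b s' ihs =>
      rw [List.pairwise_cons] at hf hs
      simp only [pvMergeLoop]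
      split_ifs with hc
      · have hab : pvKey a < pvKey b := (pvKey_lt_iff a b).mpr hc
        refine List.pairwise_cons.mpr ⟨?_, ihf hf.2 (List.pairwise_cons.mpr hs)⟩
        intro y hy
        have hy' : y ∈ f' ++ b :: s' := (pvMergeLoop_perm f' (b :: s')).mem_iff.mp hy
        rcases List.mem_append.mp hy' with hyf | hyb
        · exact hf.1 y hyf
        · rcases List.mem_cons.mp hyb with rfl | hys
          · exact le_of_lt hab
          · exact le_of_lt (lt_of_lt_of_le hab (hs.1 y hys))
      · have hba : pvKey b ≤ pvKey a :=
          le_of_not_gt (fun hlt => hc ((pvKey_lt_iff a b).mp hlt))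
        refine List.pairwise_cons.mpr ⟨?_, ihs hs.2⟩
        intro y hy
        have hy' : y ∈ (a :: f') ++ s' := (pvMergeLoop_perm (a :: f') s').mem_iff.mp hy
        rcases List.mem_append.mp hy' with hya | hys
        · rcases List.mem_cons.mp hya with rfl | hyf
          · exact hba
          · exact le_trans hba (hf.1 y hyf)
        · exact hs.1 y hys

theorem msort_perm (l : List (Int × Int)) : (merge_sort_pairs_second l).Perm l := by
  induction l using merge_sort_pairs_second.induct with
  | case1 l h i ih1 ih2 =>
    rw [merge_sort_pairs_second, dif_pos h]
    refine (pvMergeLoop_perm _ _).trans ?_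
    have := (ih1.append ih2)
    simpa [List.take_append_drop] using this
  | case2 l h =>
    rw [merge_sort_pairs_second, dif_neg h]

theorem msort_pairwise (l : List (Int × Int)) :
    (merge_sort_pairs_second l).Pairwise (fun a b => pvKey a ≤ pvKey b) := by
  induction l using merge_sort_pairs_second.induct with
  | case1 l h i ih1 ih2 =>
    rw [merge_sort_pairs_second, dif_pos h]
    exact pvMergeLoop_pairwise ih1 ih2
  | case2 l h =>
    rw [merge_sort_pairs_second, dif_neg h]
    rcases l with _ | ⟨x, _ | ⟨y, t⟩⟩ <;> simp_all

theorem alt_eq_sorted (l : List (Int × Int)) :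
    merge_sort_pairs_second_alt l = PySem.List.sorted l pvKey := by
  rw [merge_sort_pairs_second_alt, PySem.List.sorted2, PySem.List.sorted_eq_foldl_insertBy]
  simp only []
  congr 1
  funext acc x
  congr 1
  funext a b
  rcases lt_trichotomy a.2 b.2 with h | h | h <;>
    simp [pvKey_lt_iff, h, not_lt_of_gt]

theorem alt_perm (l : List (Int × Int)) : (merge_sort_pairs_second_alt l).Perm l :=
  PySem.List.sorted2_perm l _ _ false

theorem alt_pairwise (l : List (Int × Int)) :
    (merge_sort_pairs_second_alt l).Pairwise (fun a b => pvKey a ≤ pvKey b) := by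
  rw [alt_eq_sorted]
  exact PySem.List.sorted_pairwise l pvKey

-- ===== VERDICT (by name: the statement is the Claim_ definition above) =====
theorem merge_sort_pairs_second_spec : Claim_equal_merge_sort_pairs_second := by
  intro list _
  unfold Spec_merge_sort_pairs_second
  exact PySem.List.eq_of_perm_of_pairwise_le_of_injective pvKey pvKey_injective
    ((msort_perm list).trans (alt_perm list).symm)
    (msort_pairwise list) (alt_pairwise list)
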